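-- pv_equiv track=rewrite | github.com/Electrostatics/pdb2pqr | pdb2pqr/utilities.py | analyzeConnectivity
-- ===== SOURCE A (Python) =====
-- def analyzeConnectivity(map, key):
--     """
--         Analyze the connectivity of a given map using the key value.
--
--         Parameters
--             map:  The map to analyze (dict)
--             key:  The key value (variable)
--         Returns
--             list: A list of connected values to the key (list)
--     """
--     list = []
--     keys = [key]
--     while len(keys) > 0:
--         key = keys[0]
--         if key not in list:
--             list.append(key)
--             # The following 4 lines are modified by Greg Cipriano as a bug fix
--             if key in map:
--                 for value in map[key]:
--                     if value not in list:
--                         keys.append(value)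
--
--         keys.pop(keys.index(key))
--
--     return list
-- ===== SOURCE B (Python) =====
-- def analyzeConnectivity(map, key):
--     """Level-synchronous (frontier) BFS collecting values reachable from key."""
--     result = [key]
--     frontier = [key]
--     while frontier:
--         next_frontier = []
--         for node in frontier:
--             if node in map:
--                 for value in map[node]:
--                     if value not in result:
--                         result.append(value)
--                         next_frontier.append(value)
--         frontier = next_frontier
--     return result
-- ===== Notes on version B (the rewrite author's own statement) =====
-- stated objective: alternative
-- what changed: Replaced A's single queue loop (which enqueues possibly-duplicate nodes, re-checks visitedness at dequeue, and pops the front with index/pop) by a level-synchronous frontier BFS: nodes are marked in the result at discovery time, so the frontier never holds duplicates and there is no pop/index bookkeeping.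
import Mathlib
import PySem

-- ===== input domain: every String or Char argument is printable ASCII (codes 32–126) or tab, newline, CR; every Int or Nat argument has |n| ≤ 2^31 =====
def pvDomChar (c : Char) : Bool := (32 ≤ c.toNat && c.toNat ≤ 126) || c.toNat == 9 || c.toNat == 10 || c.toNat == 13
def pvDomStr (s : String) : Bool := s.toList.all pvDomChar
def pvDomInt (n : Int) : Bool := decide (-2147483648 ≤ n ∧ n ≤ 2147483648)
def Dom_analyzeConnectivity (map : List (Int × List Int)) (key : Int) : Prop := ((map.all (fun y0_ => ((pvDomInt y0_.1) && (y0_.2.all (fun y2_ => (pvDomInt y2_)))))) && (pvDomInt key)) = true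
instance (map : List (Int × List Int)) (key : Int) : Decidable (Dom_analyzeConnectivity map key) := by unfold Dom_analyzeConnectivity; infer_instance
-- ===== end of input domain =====

-- B re-implements A's queue BFS (duplicates allowed in the queue, visited-check at dequeue,
-- front removal via index/pop) as a level-synchronous frontier BFS that marks nodes at
-- discovery time; same return value, different loop structure (objective: alternative).

-- ===== PORT A =====
-- Helper lemmas used by the termination measures of both ports.

theorem pvLenFilterNotMono (U s t : List Int) (h : ∀ v, v ∈ s → v ∈ t) :
    (U.filter (fun v => decide (v ∉ t))).length ≤ (U.filter (fun v => decide (v ∉ s))).length := by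
  induction U with
  | nil => simp
  | cons u U ih =>
    rw [List.filter_cons, List.filter_cons]
    by_cases hs : u ∈ s
    · have ht : u ∈ t := h u hs
      rw [if_neg (by simp [ht]), if_neg (by simp [hs])]
      exact ih
    · by_cases ht : u ∈ t
      · rw [if_neg (by simp [ht]), if_pos (by simp [hs])]
        simp only [List.length_cons]
        omega
      · rw [if_pos (by simp [ht]), if_pos (by simp [hs])]
        simp only [List.length_cons]
        omega

theorem pvLenFilterNotStrict (U l : List Int) (a : Int) (ha : a ∈ U) (hal : a ∉ l) :
    (U.filter (fun v => decide (v ∉ l ++ [a]))).length < (U.filter (fun v => decide (v ∉ l))).length := by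
  induction U with
  | nil => cases ha
  | cons u U ih =>
    rw [List.filter_cons, List.filter_cons]
    by_cases hua : u = a
    · subst hua
      have hmono := pvLenFilterNotMono U l (l ++ [u]) (fun v hv => by simp [hv])
      rw [if_neg (by simp), if_pos (by simp [hal])]
      simp only [List.length_cons]
      omega
    · have ha' : a ∈ U := by
        cases ha with
        | head => exact absurd rfl hua
        | tail _ h => exact h
      by_cases hul : u ∈ l
      · have h1 : u ∈ l ++ [a] := by simp [hul]
        rw [if_neg (by simp [h1]), if_neg (by simp [hul])]
        exact ih ha'
      · have h1 : u ∉ l ++ [a] := by simp [List.mem_append, hul, hua]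
        rw [if_pos (by simp [h1]), if_pos (by simp [hul])]
        simp only [List.length_cons]
        have := ih ha'
        omega

theorem pvLenFilterNotCongrOut (U l : List Int) (a : Int) (haU : a ∉ U) :
    (U.filter (fun v => decide (v ∉ l ++ [a]))).length = (U.filter (fun v => decide (v ∉ l))).length := by
  congr 1
  apply List.filter_congr
  intro v hv
  have hva : v ≠ a := fun h => haU (h ▸ hv)
  simp [List.mem_append, hva]

-- Port of A: the while-loop over `keys`; `keys.pop(keys.index(key))` always removes index 0
-- because `key = keys[0]` and appends go to the end.
def analyzeConnectivityLoop (map : List (Int × List Int)) (list keys : List Int) : List Int :=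
  match keys with
  | [] => list
  | key :: rest =>
    if hmem : key ∈ list then
      -- keys.pop(keys.index(key)): key is at index 0, so the front is removed
      analyzeConnectivityLoop map list rest
    else
      let list1 := list ++ [key]
      match hq : (PySem.Dict.mk map).get? key with
      | some vs =>
        -- for value in map[key]: if value not in list: keys.append(value)
        let keys1 := vs.foldl (fun ks v => if v ∉ list1 then ks ++ [v] else ks) (key :: rest)
        -- keys.pop(keys.index(key)): key is still keys1[0]
        analyzeConnectivityLoop map list1 keys1.tail
      | none => analyzeConnectivityLoop map list1 rest
termination_by ((((map.map Prod.fst).filter (fun v => decide (v ∉ list))).length, keys.length) : Nat × Nat)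
decreasing_by
  · exact Prod.Lex.right _ (by simp)
  · apply Prod.Lex.left
    have hk : key ∈ map.map Prod.fst := by
      by_contra hn
      have : (PySem.Dict.mk map).get? key = none := by
        rw [PySem.Dict.get?_eq_none_iff_not_mem_keys]
        simpa [PySem.Dict.keys] using hn
      rw [this] at hq; cases hq
    exact pvLenFilterNotStrict _ list key hk hmem
  · have hk : key ∉ map.map Prod.fst := by
      have := (PySem.Dict.get?_eq_none_iff_not_mem_keys _ _).mp hq
      simpa [PySem.Dict.keys] using this
    have heq := pvLenFilterNotCongrOut (map.map Prod.fst) list key hk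
    rw [heq]
    exact Prod.Lex.right _ (by simp)

def analyzeConnectivity (map : List (Int × List Int)) (key : Int) : List Int :=
  analyzeConnectivityLoop map [] [key]

-- ===== PORT B =====
-- B-side helpers (needed for port B's termination): `pvNew seen xs` is the list of new
-- elements xs contributes when appended one by one against `seen`.

def pvNew (seen xs : List Int) : List Int :=
  match xs with
  | [] => []
  | v :: vs => if v ∈ seen then pvNew seen vs else v :: pvNew (seen ++ [v]) vs

theorem pvNew_mem (seen xs : List Int) (v : Int) (h : v ∈ pvNew seen xs) :
    v ∈ xs ∧ v ∉ seen := by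
  induction xs generalizing seen with
  | nil => simp [pvNew] at h
  | cons x xs ih =>
    by_cases hx : x ∈ seen
    · simp only [pvNew, if_pos hx] at h
      have := ih seen h
      exact ⟨List.mem_cons_of_mem _ this.1, this.2⟩
    · simp only [pvNew, if_neg hx] at h
      cases h with
      | head => exact ⟨List.mem_cons_self, hx⟩
      | tail _ h =>
        have := ih (seen ++ [x]) h
        refine ⟨List.mem_cons_of_mem _ this.1, fun hv => this.2 (by simp [hv])⟩

theorem pvNew_nodup (seen xs : List Int) : (pvNew seen xs).Nodup := by
  induction xs generalizing seen with
  | nil => simp [pvNew]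
  | cons x xs ih =>
    by_cases hx : x ∈ seen
    · simpa [pvNew, hx] using ih seen
    · simp only [pvNew, if_neg hx]
      refine List.Nodup.cons ?_ (ih (seen ++ [x]))
      intro hmem
      exact (pvNew_mem _ _ _ hmem).2 (by simp)

-- the children one BFS level contributes, in B's discovery order
def pvBchil (map : List (Int × List Int)) (r F : List Int) : List Int :=
  match F with
  | [] => []
  | k :: F' =>
    let c := pvNew r (((PySem.Dict.mk map).get? k).getD [])
    c ++ pvBchil map (r ++ c) F'

theorem pvMemMkSnd (map : List (Int × List Int)) (k : Int) (vs : List Int)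
    (hq : (PySem.Dict.mk map).get? k = some vs) (v : Int) (hv : v ∈ vs) :
    v ∈ map.flatMap Prod.snd := by
  have hmem : (k, vs) ∈ (PySem.Dict.mk map).items := PySem.Dict.mem_items_of_get?_eq_some _ hq
  exact List.mem_flatMap.mpr ⟨(k, vs), hmem, hv⟩

theorem pvBchil_mem (map : List (Int × List Int)) (r F : List Int) (v : Int)
    (h : v ∈ pvBchil map r F) : v ∈ map.flatMap Prod.snd ∧ v ∉ r := by
  induction F generalizing r with
  | nil => simp [pvBchil] at h
  | cons k F ih =>
    simp only [pvBchil, List.mem_append] at h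
    cases h with
    | inl h =>
      have hv := pvNew_mem _ _ _ h
      refine ⟨?_, hv.2⟩
      cases hq : (PySem.Dict.mk map).get? k with
      | none => rw [hq] at hv; simp at hv
      | some vs =>
        rw [hq] at hv
        exact pvMemMkSnd map k vs hq v hv.1
    | inr h =>
      have := ih _ h
      exact ⟨this.1, fun hv => this.2 (by simp [hv])⟩

theorem pvBchil_nodup (map : List (Int × List Int)) (r F : List Int) :
    (pvBchil map r F).Nodup := by
  induction F generalizing r with
  | nil => simp [pvBchil]
  | cons k F ih =>
    simp only [pvBchil]
    refine List.Nodup.append (pvNew_nodup _ _) (ih _) ?_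
    intro a ha hb
    exact (pvBchil_mem _ _ _ _ hb).2 (by simp [ha])

theorem pvInnerSpec (vs r n : List Int) :
    vs.foldl (fun (rn : List Int × List Int) v =>
        if v ∉ rn.1 then (rn.1 ++ [v], rn.2 ++ [v]) else rn) (r, n)
      = (r ++ pvNew r vs, n ++ pvNew r vs) := by
  induction vs generalizing r n with
  | nil => simp [pvNew]
  | cons v vs ih =>
    rw [List.foldl_cons]
    by_cases hv : v ∈ r
    · rw [if_neg (not_not_intro hv)]
      rw [ih]
      simp [pvNew, hv]
    · rw [if_pos hv]
      rw [ih]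
      simp [pvNew, hv, List.append_assoc]

theorem pvLevBSpec (map : List (Int × List Int)) (F r n : List Int) :
    F.foldl (fun (rn : List Int × List Int) node =>
        match (PySem.Dict.mk map).get? node with
        | some vs => vs.foldl (fun rn v =>
            if v ∉ rn.1 then (rn.1 ++ [v], rn.2 ++ [v]) else rn) rn
        | none => rn) (r, n)
      = (r ++ pvBchil map r F, n ++ pvBchil map r F) := by
  induction F generalizing r n with
  | nil => simp [pvBchil]
  | cons k F ih =>
    simp only [List.foldl_cons]
    cases hq : (PySem.Dict.mk map).get? k with
    | none =>
      simp only [pvBchil, hq]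
      simpa [pvNew] using ih r n
    | some vs =>
      simp only [pvBchil, hq]
      rw [pvInnerSpec]
      rw [ih (r ++ pvNew r vs) (n ++ pvNew r vs)]
      simp [List.append_assoc]

theorem pvLenFilterSum (U r n : List Int) (hsub : ∀ a ∈ n, a ∈ U) (hnd : n.Nodup)
    (hdis : ∀ a ∈ n, a ∉ r) :
    (U.filter (fun v => decide (v ∉ r ++ n))).length + n.length
      ≤ (U.filter (fun v => decide (v ∉ r))).length := by
  induction n generalizing r with
  | nil => simp
  | cons a n ih =>
    have h1 := pvLenFilterNotStrict U r a (hsub a List.mem_cons_self) (hdis a List.mem_cons_self)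
    have h2 := ih (fun b hb => hsub b (List.mem_cons_of_mem _ hb)) hnd.of_cons (r := r ++ [a])
      (fun b hb => by
        have hba : b ≠ a := fun h => (List.nodup_cons.mp hnd).1 (h ▸ hb)
        simp [List.mem_append, hdis b (List.mem_cons_of_mem _ hb), hba])
    have h3 : (U.filter (fun v => decide (v ∉ (r ++ [a]) ++ n))).length
        = (U.filter (fun v => decide (v ∉ r ++ a :: n))).length := by
      congr 1
      apply List.filter_congr
      intro v _
      exact decide_eq_decide.mpr (not_congr (by simp [List.mem_append, List.mem_cons, or_assoc]))
    simp only [List.length_cons]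
    omega

-- Port of B: level-synchronous frontier BFS (while frontier: build next_frontier).
def analyzeConnectivityAltLoop (map : List (Int × List Int)) (result frontier : List Int) : List Int :=
  match frontier with
  | [] => result
  | node :: rest =>
    let p := (node :: rest).foldl
      (fun (rn : List Int × List Int) node =>
        match (PySem.Dict.mk map).get? node with
        | some vs => vs.foldl (fun rn v =>
            if v ∉ rn.1 then (rn.1 ++ [v], rn.2 ++ [v]) else rn) rn
        | none => rn)
      (result, [])
    analyzeConnectivityAltLoop map p.1 p.2
termination_by ((map.flatMap Prod.snd).filter (fun v => decide (v ∉ result))).length + frontier.length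
decreasing_by
  simp only [dite_eq_ite]
  simp only [pvLevBSpec]
  simp only [List.nil_append]
  have hN := pvLenFilterSum (map.flatMap Prod.snd) result (pvBchil map result (node :: rest))
    (fun a ha => (pvBchil_mem _ _ _ _ ha).1) (pvBchil_nodup _ _ _)
    (fun a ha => (pvBchil_mem _ _ _ _ ha).2)
  simp only [List.length_cons]
  omega

def analyzeConnectivity_alt (map : List (Int × List Int)) (key : Int) : List Int :=
  analyzeConnectivityAltLoop map [key] [key]

-- ===== PRECONDITION & SPEC =====
def Spec_analyzeConnectivity (map : List (Int × List Int)) (key : Int) (out : List Int) : Prop := out = analyzeConnectivity_alt map key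
instance (map : List (Int × List Int)) (key : Int) (out : List Int) : Decidable (Spec_analyzeConnectivity map key out) := by unfold Spec_analyzeConnectivity; infer_instance

-- ===== CLAIM (what is proved, stated in full; the proofs are below) =====
def Claim_equal_analyzeConnectivity : Prop := ∀ (map : List (Int × List Int)) (key : Int), Dom_analyzeConnectivity map key → Spec_analyzeConnectivity map key (analyzeConnectivity map key)

-- ===== LEMMAS AND PROOFS =====

theorem pvALoop_nil (mp : List (Int × List Int)) (l : List Int) :
    analyzeConnectivityLoop mp l [] = l := by
  rw [analyzeConnectivityLoop]

theorem pvALoop_cons_mem (mp : List (Int × List Int)) (l : List Int) (key : Int)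
    (rest : List Int) (h : key ∈ l) :
    analyzeConnectivityLoop mp l (key :: rest) = analyzeConnectivityLoop mp l rest := by
  rw [analyzeConnectivityLoop]
  simp [h]

theorem pvALoop_cons_some (mp : List (Int × List Int)) (l : List Int) (key : Int)
    (rest vs : List Int) (h : key ∉ l) (hq : (PySem.Dict.mk mp).get? key = some vs) :
    analyzeConnectivityLoop mp l (key :: rest)
      = analyzeConnectivityLoop mp (l ++ [key])
          (rest ++ vs.filter (fun v => decide (v ∉ l ++ [key]))) := by
  rw [analyzeConnectivityLoop]
  rw [dif_neg h]
  split
  · next vs2 hq2 =>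
    rw [hq] at hq2
    injection hq2 with hvs
    subst hvs
    show analyzeConnectivityLoop mp (l ++ [key])
        (vs.foldl (fun ks v => if v ∉ l ++ [key] then ks ++ [v] else ks) (key :: rest)).tail = _
    rw [PySem.List.foldl_append_ite_eq_filter]
    rw [List.cons_append, List.tail_cons]
  · next hq2 =>
    rw [hq] at hq2
    cases hq2

theorem pvALoop_cons_none (mp : List (Int × List Int)) (l : List Int) (key : Int)
    (rest : List Int) (h : key ∉ l) (hq : (PySem.Dict.mk mp).get? key = none) :
    analyzeConnectivityLoop mp l (key :: rest)
      = analyzeConnectivityLoop mp (l ++ [key]) rest := by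
  rw [analyzeConnectivityLoop]
  rw [dif_neg h]
  split
  · next vs2 hq2 =>
    rw [hq] at hq2
    cases hq2
  · rfl

theorem pvBLoop_nil (mp : List (Int × List Int)) (r : List Int) :
    analyzeConnectivityAltLoop mp r [] = r := by
  rw [analyzeConnectivityAltLoop.eq_def]

theorem pvBLoop_cons (mp : List (Int × List Int)) (r : List Int) (k : Int) (F : List Int) :
    analyzeConnectivityAltLoop mp r (k :: F)
      = analyzeConnectivityAltLoop mp (r ++ pvBchil mp r (k :: F)) (pvBchil mp r (k :: F)) := by
  rw [analyzeConnectivityAltLoop.eq_def]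
  simp only [pvLevBSpec, List.nil_append]

-- children appended by A's level processing, indexed by the deduped new keys
def pvChil (mp : List (Int × List Int)) (l D : List Int) : List Int :=
  match D with
  | [] => []
  | k :: D' =>
    (match (PySem.Dict.mk mp).get? k with
     | some vs => vs.filter (fun v => decide (v ∉ l ++ [k]))
     | none => []) ++ pvChil mp (l ++ [k]) D'

theorem pvChil_mem (mp : List (Int × List Int)) (D : List Int) :
    ∀ (l : List Int) (v : Int), v ∈ pvChil mp l D → v ∈ mp.flatMap Prod.snd := by
  induction D with
  | nil => intro l v h; simp [pvChil] at h
  | cons k D ih =>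
    intro l v h
    simp only [pvChil, List.mem_append] at h
    cases h with
    | inl h =>
      cases hq : (PySem.Dict.mk mp).get? k with
      | none => rw [hq] at h; simp at h
      | some vs =>
        rw [hq] at h
        exact pvMemMkSnd mp k vs hq v (List.mem_of_mem_filter h)
    | inr h => exact ih _ v h

theorem pvNew_append (s xs ys : List Int) :
    pvNew s (xs ++ ys) = pvNew s xs ++ pvNew (s ++ pvNew s xs) ys := by
  induction xs generalizing s with
  | nil => simp [pvNew]
  | cons x xs ih =>
    by_cases hx : x ∈ s
    · simp [pvNew, hx, ih]
    · simp only [List.cons_append, pvNew, if_neg hx]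
      rw [ih (s ++ [x])]
      simp [List.append_assoc]

theorem pvNew_filter_sub (s t xs : List Int) (h : ∀ v ∈ xs, v ∈ t → v ∈ s) :
    pvNew s (xs.filter (fun v => decide (v ∉ t))) = pvNew s xs := by
  induction xs generalizing s with
  | nil => simp
  | cons x xs ih =>
    rw [List.filter_cons]
    by_cases hx : x ∈ t
    · rw [if_neg (by simp [hx])]
      rw [ih s (fun v hv => h v (List.mem_cons_of_mem _ hv))]
      have hxs : x ∈ s := h x List.mem_cons_self hx
      rw [pvNew, if_pos hxs]
    · rw [if_pos (by simp [hx])]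
      by_cases hxs : x ∈ s
      · rw [pvNew, if_pos hxs, pvNew, if_pos hxs]
        exact ih s (fun v hv => h v (List.mem_cons_of_mem _ hv))
      · rw [pvNew, if_neg hxs, pvNew, if_neg hxs]
        congr 1
        exact ih (s ++ [x])
          (fun v hv hvt => List.mem_append_left _ (h v (List.mem_cons_of_mem _ hv) hvt))

theorem pvBridge (mp : List (Int × List Int)) (F : List Int) :
    ∀ (l s : List Int), (∀ v, v ∈ l ++ F → v ∈ s) →
      pvNew s (pvChil mp l F) = pvBchil mp s F := by
  induction F with
  | nil => intro l s _; simp [pvChil, pvBchil, pvNew]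
  | cons k F ih =>
    intro l s h
    cases hq : (PySem.Dict.mk mp).get? k with
    | none =>
      simp only [pvChil, hq, List.nil_append, pvBchil, Option.getD_none]
      simp only [pvNew, List.append_nil]
      exact ih (l ++ [k]) s (fun v hv => h v (by
        simp only [List.mem_append, List.mem_cons, List.not_mem_nil, or_false] at hv ⊢
        tauto))
    | some vs =>
      have hsub : ∀ v ∈ vs, v ∈ l ++ [k] → v ∈ s := by
        intro v _ hv
        apply h
        simp only [List.mem_append, List.mem_cons, List.not_mem_nil, or_false] at hv ⊢
        tauto
      simp only [pvChil, hq, pvBchil, Option.getD_some]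
      rw [pvNew_append, pvNew_filter_sub s (l ++ [k]) vs hsub]
      congr 1
      exact ih (l ++ [k]) (s ++ pvNew s vs) (fun v hv => List.mem_append_left _ (h v (by
        simp only [List.mem_append, List.mem_cons, List.not_mem_nil, or_false] at hv ⊢
        tauto)))

theorem pvA1 (mp : List (Int × List Int)) (Q : List Int) :
    ∀ (l C : List Int),
      analyzeConnectivityLoop mp l (Q ++ C)
        = analyzeConnectivityLoop mp (l ++ pvNew l Q) (C ++ pvChil mp l (pvNew l Q)) := by
  induction Q with
  | nil => intro l C; simp [pvNew, pvChil]
  | cons q Q ih =>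
    intro l C
    by_cases hm : q ∈ l
    · rw [List.cons_append, pvALoop_cons_mem mp l q (Q ++ C) hm, ih l C]
      rw [pvNew, if_pos hm]
    · have hN : pvNew l (q :: Q) = q :: pvNew (l ++ [q]) Q := by
        rw [pvNew, if_neg hm]
      cases hq : (PySem.Dict.mk mp).get? q with
      | some vs =>
        rw [List.cons_append, pvALoop_cons_some mp l q (Q ++ C) vs hm hq]
        rw [List.append_assoc]
        rw [ih (l ++ [q]) (C ++ vs.filter (fun v => decide (v ∉ l ++ [q])))]
        rw [hN, pvChil, hq]
        congr 1 <;> simp [List.append_assoc]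
      | none =>
        rw [List.cons_append, pvALoop_cons_none mp l q (Q ++ C) hm hq]
        rw [ih (l ++ [q]) C]
        rw [hN, pvChil, hq]
        congr 1 <;> simp

theorem pvMain (mp : List (Int × List Int)) (u0 : Int) :
    ∀ (n : Nat) (l Q : List Int), (∀ q ∈ Q, q ∈ u0 :: mp.flatMap Prod.snd) →
      (((u0 :: mp.flatMap Prod.snd).filter (fun v => decide (v ∉ l))).length ≤ n) →
      analyzeConnectivityLoop mp l Q
        = analyzeConnectivityAltLoop mp (l ++ pvNew l Q) (pvNew l Q) := by
  intro n
  induction n with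
  | zero =>
    intro l Q hQ hn
    cases hD : pvNew l Q with
    | nil =>
      have h1 := pvA1 mp Q l []
      rw [List.append_nil, hD] at h1
      rw [h1]
      simp [pvChil, pvALoop_nil, pvBLoop_nil]
    | cons d D' =>
      exfalso
      have hdm : d ∈ pvNew l Q := by rw [hD]; exact List.mem_cons_self
      have hd := pvNew_mem l Q d hdm
      have hdU : d ∈ u0 :: mp.flatMap Prod.snd := hQ d hd.1
      have hstrict := pvLenFilterNotStrict (u0 :: mp.flatMap Prod.snd) l d hdU hd.2
      omega
  | succ n ih =>
    intro l Q hQ hn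
    cases hD : pvNew l Q with
    | nil =>
      have h1 := pvA1 mp Q l []
      rw [List.append_nil, hD] at h1
      rw [h1]
      simp [pvChil, pvALoop_nil, pvBLoop_nil]
    | cons d D' =>
      have hdm : d ∈ pvNew l Q := by rw [hD]; exact List.mem_cons_self
      have hd := pvNew_mem l Q d hdm
      have hdU : d ∈ u0 :: mp.flatMap Prod.snd := hQ d hd.1
      have hstrict := pvLenFilterNotStrict (u0 :: mp.flatMap Prod.snd) l d hdU hd.2
      have hmono := pvLenFilterNotMono (u0 :: mp.flatMap Prod.snd) (l ++ [d]) (l ++ pvNew l Q)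
        (fun v hv => by
          rcases List.mem_append.mp hv with hv | hv
          · exact List.mem_append_left _ hv
          · have hvd : v = d := by simpa using hv
            exact hvd ▸ List.mem_append_right _ hdm)
      have h1 := pvA1 mp Q l []
      rw [List.append_nil, List.nil_append] at h1
      have hQ1 : ∀ q ∈ pvChil mp l (pvNew l Q), q ∈ u0 :: mp.flatMap Prod.snd :=
        fun q hq => List.mem_cons_of_mem _ (pvChil_mem mp (pvNew l Q) l q hq)
      have hmeas : ((u0 :: mp.flatMap Prod.snd).filter
          (fun v => decide (v ∉ l ++ pvNew l Q))).length ≤ n := by omega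
      have h2 := ih (l ++ pvNew l Q) (pvChil mp l (pvNew l Q)) hQ1 hmeas
      have h4 := pvBridge mp (pvNew l Q) l (l ++ pvNew l Q) (fun v hv => hv)
      have h3 := pvBLoop_cons mp (l ++ pvNew l Q) d D'
      rw [← hD] at h3
      rw [← hD]
      rw [h1, h2, h4, ← h3]

-- ===== VERDICT (by name: the statement is the Claim_ definition above) =====
theorem analyzeConnectivity_spec : Claim_equal_analyzeConnectivity := by
  intro mp key _
  show analyzeConnectivity mp key = analyzeConnectivity_alt mp key
  have h := pvMain mp key (((key :: mp.flatMap Prod.snd).filter (fun v => decide (v ∉ ([] : List Int)))).length)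
    [] [key] (by intro q hq; simp at hq; simp [hq]) le_rfl
  simpa [analyzeConnectivity, analyzeConnectivity_alt, pvNew] using h
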